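-- pv_equiv track=rewrite | github.com/Tylerqche/Projects_Python | Cmsc132_HW1.py | unique_largest
-- ===== SOURCE A (Python) =====
-- def unique_largest(num):
--     """
--         >>> unique_largest(123132)
--         False
--         >>> unique_largest(7264578364)
--         True
--         >>> unique_largest(2)
--         True
--         >>> unique_largest(444444)
--         False
--     """
--     #- YOUR CODE STARTS HERE
--     maxDigit = 0
--     compNum = num
--     count = 0
--     while(compNum>0):
--         if num != 0:
--             digit = num % 10 # Checks for digit
--             if digit > maxDigit:
--                 maxDigit = digit # Sets digit to maxDigit, if digit is the largest
--             else:
--                 num = num // 10 # Increments number down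
--         else: # Continues problem once max digit of num is found
--             if compNum != 0:
--                 compDigit = compNum % 10
--                 if compDigit == maxDigit:
--                     count += 1 # Increments count for each time digit is repeated
--                 compNum = compNum // 10 # Increments compNum down
--
--     '''
--     By compressing all the code into two steps
--     in an if and else condition I was able to write the code
--     in only 1 loop, as per the challenge.
--     '''
--
--     if count == 1: # If maxDigit is present once return True
--         return True
--     else:
--         return False
-- ===== SOURCE B (Python) =====
-- def unique_largest(num):
--     max_digit = -1
--     count = 0
--     n = num
--     while n > 0:
--         d = n % 10
--         if d > max_digit:
--             max_digit = d
--             count = 1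
--         elif d == max_digit:
--             count += 1
--         n //= 10
--     return count == 1
-- ===== Notes on version B (the rewrite author's own statement) =====
-- stated objective: simpler
-- what changed: Replaces A's two-phase interleaved loop (first scan all digits for the max, then rescan all digits to count it) by a single pass that tracks the running max digit and its multiplicity, resetting the count whenever a strictly larger digit appears.
import Mathlib
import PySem

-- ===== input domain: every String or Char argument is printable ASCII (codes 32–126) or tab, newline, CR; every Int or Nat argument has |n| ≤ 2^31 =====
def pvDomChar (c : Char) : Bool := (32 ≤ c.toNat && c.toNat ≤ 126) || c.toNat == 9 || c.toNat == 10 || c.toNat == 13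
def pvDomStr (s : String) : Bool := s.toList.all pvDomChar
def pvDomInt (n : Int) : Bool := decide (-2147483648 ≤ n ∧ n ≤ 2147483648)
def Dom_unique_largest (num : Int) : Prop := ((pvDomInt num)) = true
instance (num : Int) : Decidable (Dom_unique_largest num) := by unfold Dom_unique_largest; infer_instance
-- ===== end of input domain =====

-- B replaces A's two-phase loop (find the max digit, then rescan to count it) by one
-- pass that tracks the running max digit and its multiplicity (objective: simpler).

-- ===== PORT A =====
-- A's single while loop, carrying (num, compNum, maxDigit, count).  The two Prop
-- arguments record invariants of the Python execution (num stays ≥ 0 while the loop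
-- can still run, maxDigit stays a digit); they are needed only for termination.
def uniqueLargestLoop (num compNum maxDigit count : Int)
    (hn : 0 ≤ num ∨ compNum ≤ 0) (hm : 0 ≤ maxDigit ∧ maxDigit ≤ 9) : Int :=
  if hc : 0 < compNum then
    have hnum : 0 ≤ num := hn.resolve_right (by omega)
    if hz : num ≠ 0 then
      -- digit = num % 10
      if hd : PySem.Int.mod num 10 > maxDigit then
        uniqueLargestLoop num compNum (PySem.Int.mod num 10) count hn
          (by rw [PySem.Int.mod_eq_emod_of_pos (by omega)]; omega)
      else
        uniqueLargestLoop (PySem.Int.floordiv num 10) compNum maxDigit count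
          (Or.inl (by rw [PySem.Int.floordiv_eq_ediv_of_pos (by omega)]; omega)) hm
    else
      uniqueLargestLoop num (PySem.Int.floordiv compNum 10) maxDigit
        (if PySem.Int.mod compNum 10 = maxDigit then count + 1 else count)
        (Or.inl (by omega)) hm
  else count
termination_by (num.toNat + compNum.toNat, (9 - maxDigit).toNat)
decreasing_by
  · apply Prod.Lex.right
    rw [PySem.Int.mod_eq_emod_of_pos (by omega)] at hd
    rw [PySem.Int.mod_eq_emod_of_pos (by omega)]
    omega
  · apply Prod.Lex.left
    rw [PySem.Int.floordiv_eq_ediv_of_pos (by omega)]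
    omega
  · apply Prod.Lex.left
    rw [PySem.Int.floordiv_eq_ediv_of_pos (by omega)]
    omega

def unique_largest (num : Int) : Bool :=
  if uniqueLargestLoop num num 0 0 (Int.le_total 0 num) ⟨by omega, by omega⟩ = 1
  then true else false

-- ===== PORT B =====
-- B's loop: one pass over the digits, state (n, max_digit, count).
def uniqueLargestAltLoop (n maxDigit count : Int) : Int :=
  if h : 0 < n then
    -- d = n % 10
    if PySem.Int.mod n 10 > maxDigit then
      uniqueLargestAltLoop (PySem.Int.floordiv n 10) (PySem.Int.mod n 10) 1
    else if PySem.Int.mod n 10 = maxDigit then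
      uniqueLargestAltLoop (PySem.Int.floordiv n 10) maxDigit (count + 1)
    else
      uniqueLargestAltLoop (PySem.Int.floordiv n 10) maxDigit count
  else count
termination_by n.toNat
decreasing_by all_goals
  rw [PySem.Int.floordiv_eq_ediv_of_pos (by omega)]; omega

def unique_largest_alt (num : Int) : Bool :=
  decide (uniqueLargestAltLoop num (-1) 0 = 1)

-- ===== PRECONDITION & SPEC =====
def Spec_unique_largest (num : Int) (out : Bool) : Prop := out = unique_largest_alt num
instance (num : Int) (out : Bool) : Decidable (Spec_unique_largest num out) := by unfold Spec_unique_largest; infer_instance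

-- ===== CLAIM (what is proved, stated in full; the proofs are below) =====
def Claim_equal_unique_largest : Prop := ∀ (num : Int), Dom_unique_largest num → Spec_unique_largest num (unique_largest num)

-- ===== LEMMAS AND PROOFS =====

-- the digits of n, least significant first, as integers
def pvDigs (n : Nat) : List Int :=
  if h : n = 0 then [] else ((n % 10 : Nat) : Int) :: pvDigs (n / 10)
decreasing_by exact Nat.div_lt_self (Nat.pos_of_ne_zero h) (by omega)

-- the maximum of m and the elements of l (A's first phase)
def pvMax : List Int → Int → Int
  | [], m => m
  | d :: l, m => pvMax l (if d > m then d else m)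

-- c plus the number of occurrences of m in l (A's second phase)
def pvCnt : List Int → Int → Int → Int
  | [], _, c => c
  | d :: l, m, c => pvCnt l m (if d = m then c + 1 else c)

-- B's one-pass state machine on a digit list
def pvBcnt : List Int → Int → Int → Int
  | [], _, c => c
  | d :: l, m, c =>
      if d > m then pvBcnt l d 1
      else if d = m then pvBcnt l m (c + 1)
      else pvBcnt l m c

theorem le_pvMax : ∀ (l : List Int) (m : Int), m ≤ pvMax l m := by
  intro l
  induction l with
  | nil => intro m; simp [pvMax]
  | cons d l ih =>
      intro m
      simp only [pvMax]
      split
      · exact le_trans (by omega) (ih d)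
      · exact ih m

-- characterisation of B's loop by A's two phases
theorem pvBcnt_char : ∀ (l : List Int) (m c : Int),
    pvBcnt l m c = if m < pvMax l m then pvCnt l (pvMax l m) 0 else pvCnt l m c := by
  intro l
  induction l with
  | nil => intro m c; simp [pvBcnt, pvMax, pvCnt]
  | cons d l ih =>
      intro m c
      simp only [pvBcnt, pvMax, pvCnt]
      by_cases hd : d > m
      · simp only [if_pos hd]
        rw [ih d 1]
        have hle := le_pvMax l d
        have hm2 : m < pvMax l d := by omega
        rw [if_pos hm2]
        by_cases hdm : d < pvMax l d
        · rw [if_pos hdm, if_neg (by omega)]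
        · have hmd : pvMax l d = d := by omega
          rw [if_neg hdm, hmd, if_pos rfl]
          norm_num
      · simp only [if_neg hd]
        have hle := le_pvMax l m
        by_cases hdm : d = m
        · simp only [if_pos hdm]
          rw [ih m (c + 1)]
          by_cases hm2 : m < pvMax l m
          · rw [if_pos hm2, if_pos hm2, if_neg (by omega)]
          · rw [if_neg hm2, if_neg hm2]
        · simp only [if_neg hdm]
          rw [ih m c]
          by_cases hm2 : m < pvMax l m
          · rw [if_pos hm2, if_pos hm2, if_neg (by omega)]
          · rw [if_neg hm2, if_neg hm2]

theorem pvDigs_mem : ∀ (n : Nat), ∀ x ∈ pvDigs n, 0 ≤ x ∧ x ≤ 9 := by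
  intro n
  induction n using Nat.strong_induction_on with
  | _ n ih =>
    intro x hx
    rw [pvDigs] at hx
    split at hx
    · simp at hx
    · rcases List.mem_cons.mp hx with h | h
      · subst h
        constructor
        · positivity
        · exact_mod_cast Nat.le_of_lt_succ (Nat.mod_lt _ (by omega))
      · exact ih (n / 10) (Nat.div_lt_self (Nat.pos_of_ne_zero (by assumption)) (by omega)) x h

theorem pvMax_bounds : ∀ (l : List Int) (m : Int), (∀ x ∈ l, 0 ≤ x ∧ x ≤ 9) →
    0 ≤ m → m ≤ 9 → 0 ≤ pvMax l m ∧ pvMax l m ≤ 9 := by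
  intro l
  induction l with
  | nil => intro m _ h0 h9; exact ⟨h0, h9⟩
  | cons d l ih =>
      intro m hmem h0 h9
      have hd := hmem d (List.mem_cons_self ..)
      simp only [pvMax]
      split
      · exact ih d (fun x hx => hmem x (List.mem_cons_of_mem _ hx)) hd.1 hd.2
      · exact ih m (fun x hx => hmem x (List.mem_cons_of_mem _ hx)) h0 h9

-- bridge: B's loop on ↑n computes pvBcnt on the digit list
theorem altLoop_digs : ∀ (n : Nat) (m c : Int),
    uniqueLargestAltLoop (↑n) m c = pvBcnt (pvDigs n) m c := by
  intro n
  induction n using Nat.strong_induction_on with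
  | _ n ih =>
    intro m c
    rw [uniqueLargestAltLoop, pvDigs]
    by_cases h0 : n = 0
    · subst h0; simp [pvBcnt]
    · have hpos : (0:Int) < ↑n := by exact_mod_cast Nat.pos_of_ne_zero h0
      rw [dif_pos hpos, dif_neg h0]
      have hmod : PySem.Int.mod (↑n) 10 = ((n % 10 : Nat) : Int) := by
        exact_mod_cast PySem.Int.mod_natCast n 10
      have hdiv : PySem.Int.floordiv (↑n) 10 = ((n / 10 : Nat) : Int) := by
        exact_mod_cast PySem.Int.floordiv_natCast n 10
      have hlt : n / 10 < n := Nat.div_lt_self (Nat.pos_of_ne_zero h0) (by omega)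
      simp only [pvBcnt, hmod, hdiv]
      split
      · exact ih _ hlt _ _
      · split
        · exact ih _ hlt _ _
        · exact ih _ hlt _ _

-- the loop's Prop arguments are irrelevant to its value
theorem loopA_congr {a b c d a' b' c' d' : Int} (e1 : a = a') (e2 : b = b') (e3 : c = c')
    (e4 : d = d') (p q p' q') :
    uniqueLargestLoop a b c d p q = uniqueLargestLoop a' b' c' d' p' q' := by
  subst e1; subst e2; subst e3; subst e4; rfl

-- bridge: A's loop with num = 0 is the counting phase
theorem loopA_phase2 : ∀ (cN : Nat) (m k : Int) h1 h2,
    uniqueLargestLoop 0 (↑cN) m k h1 h2 = pvCnt (pvDigs cN) m k := by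
  intro cN
  induction cN using Nat.strong_induction_on with
  | _ cN ih =>
    intro m k h1 h2
    by_cases h0 : cN = 0
    · subst h0
      rw [show pvDigs 0 = [] from by rw [pvDigs]; rfl]
      rw [uniqueLargestLoop, dif_neg (by omega : ¬ (0:Int) < ((0:Nat):Int))]
      rfl
    · have hpos : (0:Int) < ↑cN := by exact_mod_cast Nat.pos_of_ne_zero h0
      have hmod : PySem.Int.mod ((cN:Nat):Int) 10 = ((cN % 10 : Nat) : Int) := by
        exact_mod_cast PySem.Int.mod_natCast cN 10
      have hdiv : PySem.Int.floordiv ((cN:Nat):Int) 10 = ((cN / 10 : Nat) : Int) := by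
        exact_mod_cast PySem.Int.floordiv_natCast cN 10
      have hlt : cN / 10 < cN := Nat.div_lt_self (Nat.pos_of_ne_zero h0) (by omega)
      have hdigs : pvDigs cN = ((cN % 10 : Nat) : Int) :: pvDigs (cN / 10) := by
        rw [pvDigs, dif_neg h0]
      rw [hdigs]
      simp only [pvCnt]
      conv_lhs => rw [uniqueLargestLoop]
      rw [dif_pos hpos, dif_neg (by simp : ¬ (0:Int) ≠ 0)]
      calc uniqueLargestLoop 0 (PySem.Int.floordiv (↑cN) 10) m
              (if PySem.Int.mod (↑cN) 10 = m then k + 1 else k) _ h2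
          = uniqueLargestLoop 0 ((cN / 10 : Nat) : Int) m
              (if ((cN % 10 : Nat) : Int) = m then k + 1 else k) (Or.inl (by omega)) h2 :=
            loopA_congr rfl hdiv rfl (by rw [hmod]) _ _ _ _
        _ = pvCnt (pvDigs (cN / 10)) m (if ((cN % 10 : Nat) : Int) = m then k + 1 else k) :=
            ih _ hlt _ _ _ _

-- bridge: A's loop with num = ↑n first folds the max over the digits of n
theorem loopA_phase1 : ∀ (n : Nat) (comp m k : Int) h1 h2 h1' h2',
    uniqueLargestLoop (↑n) comp m k h1 h2
      = uniqueLargestLoop 0 comp (pvMax (pvDigs n) m) k h1' h2' := by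
  intro n
  induction n using Nat.strong_induction_on with
  | _ n ih =>
    intro comp m k h1 h2 h1' h2'
    by_cases hc : 0 < comp
    · by_cases h0 : n = 0
      · subst h0
        have hM : pvMax (pvDigs 0) m = m := by
          rw [show pvDigs 0 = [] from by rw [pvDigs]; rfl]
          rfl
        exact loopA_congr rfl rfl hM.symm rfl _ _ _ _
      · have hpos : (0:Int) < ↑n := by exact_mod_cast Nat.pos_of_ne_zero h0
        have hmod : PySem.Int.mod ((n:Nat):Int) 10 = ((n % 10 : Nat) : Int) := by
          exact_mod_cast PySem.Int.mod_natCast n 10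
        have hdiv : PySem.Int.floordiv ((n:Nat):Int) 10 = ((n / 10 : Nat) : Int) := by
          exact_mod_cast PySem.Int.floordiv_natCast n 10
        have hlt : n / 10 < n := Nat.div_lt_self (Nat.pos_of_ne_zero h0) (by omega)
        have hdigs : pvDigs n = ((n % 10 : Nat) : Int) :: pvDigs (n / 10) := by
          rw [pvDigs, dif_neg h0]
        have hmem := pvDigs_mem (n / 10)
        have hd9 : ((n % 10 : Nat) : Int) ≤ 9 := by
          exact_mod_cast Nat.le_of_lt_succ (Nat.mod_lt _ (by omega))
        conv_lhs => rw [uniqueLargestLoop]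
        rw [dif_pos hc, dif_pos (by omega : (↑n:Int) ≠ 0)]
        by_cases hd : PySem.Int.mod (↑n) 10 > m
        · rw [dif_pos hd]
          conv_lhs => rw [uniqueLargestLoop]
          rw [dif_pos hc, dif_pos (by omega : (↑n:Int) ≠ 0),
            dif_neg (lt_irrefl (PySem.Int.mod (↑n) 10))]
          rw [hmod] at hd
          have hM : pvMax (pvDigs n) m = pvMax (pvDigs (n / 10)) ((n % 10 : Nat) : Int) := by
            rw [hdigs]; simp only [pvMax]; rw [if_pos hd]
          calc uniqueLargestLoop (PySem.Int.floordiv (↑n) 10) comp (PySem.Int.mod (↑n) 10) k _ _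
              = uniqueLargestLoop ((n / 10 : Nat) : Int) comp ((n % 10 : Nat) : Int) k
                  (Or.inl (by positivity)) ⟨by positivity, hd9⟩ :=
                loopA_congr hdiv rfl hmod rfl _ _ _ _
            _ = uniqueLargestLoop 0 comp (pvMax (pvDigs (n / 10)) ((n % 10 : Nat) : Int)) k
                  (Or.inl (by omega))
                  (pvMax_bounds _ _ hmem (by positivity) hd9) := ih _ hlt _ _ _ _ _ _ _
            _ = uniqueLargestLoop 0 comp (pvMax (pvDigs n) m) k h1' h2' :=
                loopA_congr rfl rfl hM.symm rfl _ _ _ _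
        · rw [dif_neg hd]
          rw [hmod] at hd
          have hM : pvMax (pvDigs n) m = pvMax (pvDigs (n / 10)) m := by
            rw [hdigs]; simp only [pvMax]; rw [if_neg hd]
          calc uniqueLargestLoop (PySem.Int.floordiv (↑n) 10) comp m k _ h2
              = uniqueLargestLoop ((n / 10 : Nat) : Int) comp m k
                  (Or.inl (by positivity)) h2 := loopA_congr hdiv rfl rfl rfl _ _ _ _
            _ = uniqueLargestLoop 0 comp (pvMax (pvDigs (n / 10)) m) k
                  (Or.inl (by omega)) (pvMax_bounds _ _ hmem h2.1 h2.2) :=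
                ih _ hlt _ _ _ _ _ _ _
            _ = uniqueLargestLoop 0 comp (pvMax (pvDigs n) m) k h1' h2' :=
                loopA_congr rfl rfl hM.symm rfl _ _ _ _
    · conv_lhs => rw [uniqueLargestLoop]
      conv_rhs => rw [uniqueLargestLoop]
      rw [dif_neg hc, dif_neg hc]

theorem counts_eq : ∀ (num : Int) (h1 h2),
    uniqueLargestLoop num num 0 0 h1 h2 = uniqueLargestAltLoop num (-1) 0 := by
  intro num h1 h2
  by_cases hpos : 0 < num
  · have hn : num = ((num.toNat : Nat) : Int) := (Int.toNat_of_nonneg (le_of_lt hpos)).symm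
    have hne : num.toNat ≠ 0 := by omega
    set n := num.toNat with hnn
    have hmem := pvDigs_mem n
    have hb := pvMax_bounds (pvDigs n) 0 hmem (by omega) (by omega)
    have hA : uniqueLargestLoop num num 0 0 h1 h2
        = pvCnt (pvDigs n) (pvMax (pvDigs n) 0) 0 :=
      calc uniqueLargestLoop num num 0 0 h1 h2
          = uniqueLargestLoop (↑n) (↑n) 0 0 (Or.inl (by positivity)) ⟨by omega, by omega⟩ :=
            loopA_congr hn hn rfl rfl _ _ _ _
        _ = uniqueLargestLoop 0 (↑n) (pvMax (pvDigs n) 0) 0 (Or.inl (by omega)) hb :=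
            loopA_phase1 n _ _ _ _ _ _ _
        _ = pvCnt (pvDigs n) (pvMax (pvDigs n) 0) 0 := loopA_phase2 n _ _ _ _
    rw [hA, hn, altLoop_digs, pvBcnt_char]
    rw [show pvDigs n = ((n % 10 : Nat) : Int) :: pvDigs (n / 10) from by
      rw [pvDigs, dif_neg hne]]
    have hd0 : (0:Int) ≤ ((n % 10 : Nat) : Int) := by positivity
    simp only [pvMax]
    rw [if_pos (by omega : ((n % 10 : Nat) : Int) > -1)]
    have hle := le_pvMax (pvDigs (n / 10)) ((n % 10 : Nat) : Int)
    rw [if_pos (by omega : (-1:Int) < pvMax (pvDigs (n / 10)) ((n % 10 : Nat) : Int))]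
    by_cases hz : ((n % 10 : Nat) : Int) > 0
    · rw [if_pos hz]
    · rw [if_neg hz]
      have hz0 : ((n % 10 : Nat) : Int) = 0 := by omega
      rw [hz0]
  · rw [uniqueLargestLoop, uniqueLargestAltLoop, dif_neg hpos, dif_neg hpos]

-- ===== VERDICT (by name: the statement is the Claim_ definition above) =====
theorem unique_largest_spec : Claim_equal_unique_largest := by
  intro num _
  unfold Spec_unique_largest unique_largest unique_largest_alt
  rw [counts_eq]
  split <;> simp_all
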